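-- pv_equiv track=rewrite | github.com/aherrera1721/hyhelper | HyHelper/HyHelper_plot.py | get_dims
-- ===== SOURCE A (Python) =====
-- def get_dims(plot_objs):
--     """
--     Gets the appropriate dimensions for the amount of objects going to be plotted.
--     Adds columns before rows.
--     """
--     total = len(plot_objs)
--     row, col = 1, 1
--     while True:
--         if row * col >= total:
--             break
--         elif col == row:
--             col += 1
--         else:
--             row += 1
--     return (row, col)
-- ===== SOURCE B (Python) =====
-- def get_dims(plot_objs):
--     """
--     Gets the appropriate dimensions for the amount of objects going to be plotted.
--     Adds columns before rows.
--     """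
--     total = len(plot_objs)
--     if total <= 1:
--         return (1, 1)
--     # binary search for the smallest col with col*col >= total
--     lo, hi = 1, total          # invariant: lo*lo < total <= hi*hi
--     while hi - lo > 1:
--         mid = (lo + hi) // 2
--         if mid * mid >= total:
--             hi = mid
--         else:
--             lo = mid
--     col = hi
--     row = col - 1 if (col - 1) * col >= total else col
--     return (row, col)
-- ===== Notes on version B (the rewrite author's own statement) =====
-- stated objective: alternative
-- what changed: Replaces A's step-by-step grid growth (incrementing row/col one at a time, O(sqrt(N)) loop iterations) by a binary search for the smallest col with col*col >= N plus a direct comparison to pick the row; fewer loop iterations, but total runtime is dominated by len() of the input, so no measured speed-up.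
import Mathlib
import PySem

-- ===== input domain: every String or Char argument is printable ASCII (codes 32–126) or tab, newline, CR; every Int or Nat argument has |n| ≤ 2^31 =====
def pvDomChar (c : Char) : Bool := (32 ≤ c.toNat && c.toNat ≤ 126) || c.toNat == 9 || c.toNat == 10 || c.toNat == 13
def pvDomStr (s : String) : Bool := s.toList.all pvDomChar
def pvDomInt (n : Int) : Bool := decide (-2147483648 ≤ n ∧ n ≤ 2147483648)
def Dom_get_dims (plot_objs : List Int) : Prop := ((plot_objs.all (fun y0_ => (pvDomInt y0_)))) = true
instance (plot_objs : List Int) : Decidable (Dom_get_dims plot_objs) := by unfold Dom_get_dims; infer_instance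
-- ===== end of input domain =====

-- B replaces A's one-step-at-a-time grid growth by a binary search for the column count (a different algorithm of the same overall cost).

-- ===== PORT A =====
-- A's 'while True' loop; fuel makes it total (it is never exhausted: each
-- iteration from the initial state (1,1) strictly grows row*col toward total).
def getDimsGo (fuel : Nat) (total row col : Int) : Int × Int :=
  match fuel with
  | 0 => (row, col)
  | fuel + 1 =>
    if row * col ≥ total then (row, col)
    else if col = row then getDimsGo fuel total row (col + 1)
    else getDimsGo fuel total (row + 1) col

def get_dims (plot_objs : List Int) : List Int :=
  let total : Int := plot_objs.length
  let p := getDimsGo (2 * plot_objs.length + 3) total 1 1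
  [p.1, p.2]

-- ===== PORT B =====
-- B's binary-search loop: shrink (lo, hi] keeping lo*lo < total ≤ hi*hi.
def bsGo (total lo hi : Int) : Int :=
  if _h : hi - lo > 1 then
    let mid := PySem.Int.floordiv (lo + hi) 2
    if mid * mid ≥ total then bsGo total lo mid else bsGo total mid hi
  else hi
termination_by (hi - lo).toNat
decreasing_by
  · have := PySem.Int.floordiv_two_mid_bounds (lo := lo) (hi := hi) (by omega)
    have h2 : PySem.Int.floordiv (lo + hi) 2 = (lo + hi) / 2 :=
      PySem.Int.floordiv_eq_ediv_of_pos (by omega)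
    omega
  · have := PySem.Int.floordiv_two_mid_bounds (lo := lo) (hi := hi) (by omega)
    have h2 : PySem.Int.floordiv (lo + hi) 2 = (lo + hi) / 2 :=
      PySem.Int.floordiv_eq_ediv_of_pos (by omega)
    omega

def get_dims_alt (plot_objs : List Int) : List Int :=
  let total : Int := plot_objs.length
  if total ≤ 1 then [1, 1]
  else
    let col := bsGo total 1 total
    let row := if (col - 1) * col ≥ total then col - 1 else col
    [row, col]

-- ===== PRECONDITION & SPEC =====
def Spec_get_dims (plot_objs : List Int) (out : List Int) : Prop := out = get_dims_alt plot_objs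
instance (plot_objs : List Int) (out : List Int) : Decidable (Spec_get_dims plot_objs out) := by unfold Spec_get_dims; infer_instance

-- ===== CLAIM (what is proved, stated in full; the proofs are below) =====
def Claim_equal_get_dims : Prop := ∀ (plot_objs : List Int), Dom_get_dims plot_objs → Spec_get_dims plot_objs (get_dims plot_objs)

-- ===== LEMMAS AND PROOFS =====

-- one unfolding of A's loop
lemma getDimsGo_succ (fuel : Nat) (total row col : Int) :
    getDimsGo (fuel + 1) total row col =
      if row * col ≥ total then (row, col)
      else if col = row then getDimsGo fuel total row (col + 1)
      else getDimsGo fuel total (row + 1) col := rfl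

-- B's binary search: if lo*lo < total ≤ hi*hi and 1 ≤ lo < hi, the result c
-- satisfies 1 ≤ c ≤ hi with (c-1)*(c-1) < total ≤ c*c.
lemma bsGo_correct (total : Int) : ∀ lo hi : Int, 1 ≤ lo → lo < hi →
    lo * lo < total → total ≤ hi * hi →
    1 ≤ bsGo total lo hi ∧ bsGo total lo hi ≤ hi ∧
      (bsGo total lo hi - 1) * (bsGo total lo hi - 1) < total ∧
      total ≤ bsGo total lo hi * bsGo total lo hi := by
  intro lo hi
  induction lo, hi using bsGo.induct total with
  | case1 lo hi h mid hge ih =>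
    intro h1 hlt hlo hhi
    have hmeq : mid = PySem.Int.floordiv (lo + hi) 2 := rfl
    have h2 : mid = (lo + hi) / 2 :=
      hmeq.trans (PySem.Int.floordiv_eq_ediv_of_pos (by omega))
    have hmb : lo < mid ∧ mid < hi := by omega
    rw [bsGo, dif_pos h]
    simp only [← hmeq, if_pos hge]
    obtain ⟨c1, c2, c3, c4⟩ := ih h1 hmb.1 hlo hge
    exact ⟨c1, by omega, c3, c4⟩
  | case2 lo hi h mid hge ih =>
    intro h1 hlt hlo hhi
    have hmeq : mid = PySem.Int.floordiv (lo + hi) 2 := rfl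
    have h2 : mid = (lo + hi) / 2 :=
      hmeq.trans (PySem.Int.floordiv_eq_ediv_of_pos (by omega))
    have hmb : lo < mid ∧ mid < hi := by omega
    rw [bsGo, dif_pos h]
    simp only [← hmeq, if_neg hge]
    obtain ⟨c1, c2, c3, c4⟩ := ih (by omega) hmb.2 (not_le.mp (by simpa using hge)) hhi
    exact ⟨c1, by omega, c3, c4⟩
  | case3 lo hi h =>
    intro h1 hlt hlo hhi
    rw [bsGo, dif_neg h]
    have : hi = lo + 1 := by omega
    subst this
    exact ⟨by omega, le_rfl, by simpa using hlo, hhi⟩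

-- A's loop from a square state (r, r): if k is the least c ≥ 1 with c*c ≥ total
-- (characterised by (k-1)² < total ≤ k²) and r ≤ k with (r-1)*r < total, the
-- loop ends at (k-1, k) or (k, k) depending on whether (k-1)*k ≥ total.
lemma getDimsGo_correct (total k : Int) (hk1 : 1 ≤ k) (hk2 : total ≤ k * k)
    (hk3 : (k - 1) * (k - 1) < total) :
    ∀ (fuel : Nat) (r : Int), 1 ≤ r → r ≤ k → (r - 1) * r < total →
      2 * (k - r) + 1 ≤ (fuel : Int) →
      getDimsGo fuel total r r =
        (if (k - 1) * k ≥ total then (k - 1, k) else (k, k)) := by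
  intro fuel
  induction fuel using Nat.strong_induction_on with
  | _ fuel ih =>
    intro r hr1 hrk hr2 hfuel
    have hr0 : (0 : Int) ≤ r - 1 := by omega
    cases fuel with
    | zero => exfalso; omega
    | succ f =>
      rw [getDimsGo_succ]
      by_cases hsq : r * r ≥ total
      · have hrk' : r = k := by
          rcases lt_or_eq_of_le hrk with hlt | he
          · exfalso
            have : r * r ≤ (k - 1) * (k - 1) := by nlinarith
            omega
          · exact he
        subst hrk'
        rw [if_pos hsq, if_neg (by omega)]
      · rw [if_neg hsq, if_pos rfl]
        have hrltk : r < k := by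
          rcases lt_or_eq_of_le hrk with hlt | he
          · exact hlt
          · exfalso; subst he; omega
        cases f with
        | zero => exfalso; omega
        | succ f' =>
          rw [getDimsGo_succ]
          by_cases hrc : r * (r + 1) ≥ total
          · have hk' : k = r + 1 := by
              by_contra hne
              have hlt : r + 1 < k := by omega
              have : (r + 1) * (r + 1) ≤ (k - 1) * (k - 1) := by nlinarith
              nlinarith
            subst hk'
            have hcond : ((r + 1 : Int) - 1) * (r + 1) ≥ total := by simpa using hrc
            rw [if_pos hrc, if_pos hcond]
            simp
          · replace hrc := not_le.mp (by simpa using hrc)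
            rw [if_neg (by omega), if_neg (by omega)]
            exact ih f' (by omega) (r + 1) (by omega) (by omega)
              (by simpa using hrc) (by push_cast at hfuel ⊢; omega)

-- ===== VERDICT (by name: the statement is the Claim_ definition above) =====
theorem get_dims_spec : Claim_equal_get_dims := by
  intro plot_objs _
  unfold Spec_get_dims get_dims get_dims_alt
  set n : Nat := plot_objs.length with hn
  by_cases hle : (n : Int) ≤ 1
  · rw [if_pos hle]
    have h1 : getDimsGo (2 * n + 3) (n : Int) 1 1 = (1, 1) := by
      have : 2 * n + 3 = (2 * n + 2) + 1 := by omega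
      rw [this, getDimsGo_succ, if_pos (by omega)]
    simp [h1]
  · rw [if_neg hle]
    have htot : (2 : Int) ≤ (n : Int) := by omega
    obtain ⟨hc1, hchi, hclow, hchigh⟩ :=
      bsGo_correct (n : Int) 1 (n : Int) le_rfl (by omega) (by omega) (by nlinarith)
    set c : Int := bsGo (n : Int) 1 (n : Int) with hc
    have hmain := getDimsGo_correct (n : Int) c hc1 hchigh hclow (2 * n + 3) 1
      le_rfl (by nlinarith) (by omega) (by push_cast; nlinarith)
    by_cases hcase : (c - 1) * c ≥ (n : Int)
    · rw [if_pos hcase] at hmain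
      simp [hmain, if_pos hcase]
    · rw [if_neg hcase] at hmain
      simp [hmain, if_neg hcase]
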